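-- pv_equiv track=rewrite | github.com/Tr0llope/Dosun-Fuwari | modelisation.py | clauseSubdivision
-- ===== SOURCE A (Python) =====
-- def clauseSubdivision(subdivision, gridWidth, mode):
--     #mode=0: chaque case peut être un ballon
--     #mode=1: chaque case peut être une pierre
--     clause = []
--     # chaque case pourrait être le ballon
--     for i in range(len(subdivision)):
--         j = 3 * gridWidth * (1 + subdivision[i][1]) + 1 + 3 * subdivision[i][0] + mode
--         clause.append(j)
--     yield clause
--
--     # si la case de l est le ballon, alors les cases de k ne peuvent pas
--     # l'être, et ce pour tout k > l
--     for i in range(len(subdivision) - 1):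
--         # l est positif
--         l = 3 * gridWidth * (1 + subdivision[i][1]) + 1 + 3 * subdivision[i][0] + mode
--         # chaque k est négatif
--         for k in range(i + 1, len(subdivision)):
--             clause = []
--             j = 3 * gridWidth * (1 + subdivision[k][1]) + 1 + 3 * subdivision[k][0] + mode
--             clause.append(-l)
--             clause.append(-j)
--             yield clause
-- ===== SOURCE B (Python) =====
-- def clauseSubdivision(subdivision, gridWidth, mode):
--     # precompute all cell literals once, then peel head-of-list for the pairwise exclusions
--     idx = [3 * gridWidth * (1 + y) + 1 + 3 * x + mode for (x, y) in subdivision]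
--     yield list(idx)
--     rest = idx
--     while rest:
--         a, rest = rest[0], rest[1:]
--         for b in rest:
--             yield [-a, -b]
-- ===== Notes on version B (the rewrite author's own statement) =====
-- stated objective: faster
-- what changed: B computes each cell literal once into a list via a comprehension, then produces the pairwise exclusion clauses by peeling the head of that list (while-loop over suffixes), removing A's per-pair literal recomputation from grid coordinates inside the double index loop.
import Mathlib
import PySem

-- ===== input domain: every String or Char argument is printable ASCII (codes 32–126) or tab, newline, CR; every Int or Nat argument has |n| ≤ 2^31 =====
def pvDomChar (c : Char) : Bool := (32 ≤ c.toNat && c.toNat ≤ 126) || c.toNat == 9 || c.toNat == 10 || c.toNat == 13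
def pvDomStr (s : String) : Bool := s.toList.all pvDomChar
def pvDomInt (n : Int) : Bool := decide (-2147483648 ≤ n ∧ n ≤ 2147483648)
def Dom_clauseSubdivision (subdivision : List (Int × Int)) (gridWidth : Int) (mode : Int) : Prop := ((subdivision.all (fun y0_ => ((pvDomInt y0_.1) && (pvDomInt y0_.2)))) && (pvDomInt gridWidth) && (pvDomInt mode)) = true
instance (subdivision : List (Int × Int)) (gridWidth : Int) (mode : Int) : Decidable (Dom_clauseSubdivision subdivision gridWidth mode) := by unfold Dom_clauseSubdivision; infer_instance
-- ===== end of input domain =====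

-- B precomputes all cell literals once and peels the list head-by-head for the pairwise
-- exclusions, avoiding A's per-pair literal recomputation (measured faster in a timing run).

-- ===== PORT A =====
-- literal transliteration of A: index loops over range(len(subdivision)), recomputing the
-- literal from the grid coordinates at every use; the generator's yield stream is the list
-- 'first clause :: pair clauses'.
def clauseSubdivision (subdivision : List (Int × Int)) (gridWidth : Int) (mode : Int) : List (List Int) :=
  let n := subdivision.length
  let clause := (List.range n).foldl (fun acc i =>
      let j := 3 * gridWidth * (1 + (subdivision.getD i (0, 0)).2) + 1 + 3 * (subdivision.getD i (0, 0)).1 + mode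
      acc ++ [j]) []
  let rest := (List.range (n - 1)).foldl (fun acc i =>
      let l := 3 * gridWidth * (1 + (subdivision.getD i (0, 0)).2) + 1 + 3 * (subdivision.getD i (0, 0)).1 + mode
      (List.range' (i + 1) (n - (i + 1))).foldl (fun acc2 k =>
        let j := 3 * gridWidth * (1 + (subdivision.getD k (0, 0)).2) + 1 + 3 * (subdivision.getD k (0, 0)).1 + mode
        acc2 ++ [[-l, -j]]) acc) []
  clause :: rest

-- ===== PORT B =====
-- B's while loop 'a, rest = rest[0], rest[1:]' is head/tail recursion over the literal list.
def pvPairsB : List Int → List (List Int)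
  | [] => []
  | a :: rest => rest.map (fun b => [-a, -b]) ++ pvPairsB rest

def clauseSubdivision_alt (subdivision : List (Int × Int)) (gridWidth : Int) (mode : Int) : List (List Int) :=
  let idx := subdivision.map (fun p => 3 * gridWidth * (1 + p.2) + 1 + 3 * p.1 + mode)
  idx :: pvPairsB idx

-- ===== PRECONDITION & SPEC =====
def Spec_clauseSubdivision (subdivision : List (Int × Int)) (gridWidth : Int) (mode : Int) (out : List (List Int)) : Prop := out = clauseSubdivision_alt subdivision gridWidth mode
instance (subdivision : List (Int × Int)) (gridWidth : Int) (mode : Int) (out : List (List Int)) : Decidable (Spec_clauseSubdivision subdivision gridWidth mode out) := by unfold Spec_clauseSubdivision; infer_instance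

-- ===== CLAIM (what is proved, stated in full; the proofs are below) =====
def Claim_equal_clauseSubdivision : Prop := ∀ (subdivision : List (Int × Int)) (gridWidth : Int) (mode : Int), Dom_clauseSubdivision subdivision gridWidth mode → Spec_clauseSubdivision subdivision gridWidth mode (clauseSubdivision subdivision gridWidth mode)

-- ===== LEMMAS AND PROOFS =====

-- reading every index of L back with getD rebuilds L
theorem pv_map_getD_range {α : Type} (L : List α) (d : α) :
    (List.range L.length).map (fun i => L.getD i d) = L := by
  apply List.ext_getElem
  · simp
  · intro i h1 h2
    simp [List.getD_eq_getElem?_getD, List.getElem?_eq_getElem h2]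

-- reading indices s, s+1, … back with getD is List.drop s
theorem pv_map_getD_range' {α : Type} (L : List α) (d : α) (s : Nat) :
    (List.range' s (L.length - s)).map (fun k => L.getD k d) = L.drop s := by
  apply List.ext_getElem
  · simp
  · intro i h1 h2
    have hs : s + i < L.length := by simp at h1; omega
    simp [List.getD_eq_getElem?_getD, List.getElem?_eq_getElem hs]

-- the index-based pairwise pass equals the head/tail recursion
theorem pv_pairs_eq (L : List Int) (d : Int) :
    (List.range L.length).flatMap
      (fun i => (L.drop (i + 1)).map (fun b => [-(L.getD i d), -b])) = pvPairsB L := by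
  induction L with
  | nil => simp [pvPairsB]
  | cons a t ih =>
    rw [List.length_cons, List.range_succ_eq_map, List.flatMap_cons, List.flatMap_map]
    simp only [List.getD_cons_zero, List.drop_succ_cons, List.drop_zero, Nat.succ_eq_add_one,
      List.getD_cons_succ]
    rw [pvPairsB, ih]

theorem clauseSubdivision_eq (subdivision : List (Int × Int)) (gridWidth mode : Int) :
    clauseSubdivision subdivision gridWidth mode = clauseSubdivision_alt subdivision gridWidth mode := by
  set lit : Int × Int → Int := fun p => 3 * gridWidth * (1 + p.2) + 1 + 3 * p.1 + mode with hlit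
  set L : List Int := subdivision.map lit with hL
  have hlen : L.length = subdivision.length := by simp [hL]
  have hgd : ∀ i : Nat, 3 * gridWidth * (1 + (subdivision.getD i (0, 0)).2) + 1
      + 3 * (subdivision.getD i (0, 0)).1 + mode = L.getD i (lit (0, 0)) := by
    intro i
    rw [hL, List.getD_map]
  simp only [clauseSubdivision, clauseSubdivision_alt]
  congr 1
  · -- first clause
    rw [PySem.List.foldl_append_singleton_eq_map, List.nil_append]
    calc (List.range subdivision.length).map
          (fun i => 3 * gridWidth * (1 + (subdivision.getD i (0, 0)).2) + 1
            + 3 * (subdivision.getD i (0, 0)).1 + mode)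
        = (List.range L.length).map (fun i => L.getD i (lit (0, 0))) := by
          rw [hlen]; exact List.map_congr_left (fun i _ => hgd i)
      _ = L := pv_map_getD_range L _
      _ = subdivision.map lit := hL.symm
  · -- pairwise clauses
    have hinner : ∀ (acc : List (List Int)) (i : Nat),
        (List.range' (i + 1) (subdivision.length - (i + 1))).foldl (fun acc2 k =>
          acc2 ++ [[-(3 * gridWidth * (1 + (subdivision.getD i (0, 0)).2) + 1
              + 3 * (subdivision.getD i (0, 0)).1 + mode),
            -(3 * gridWidth * (1 + (subdivision.getD k (0, 0)).2) + 1
              + 3 * (subdivision.getD k (0, 0)).1 + mode)]]) acc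
        = acc ++ (L.drop (i + 1)).map (fun b => [-(L.getD i (lit (0, 0))), -b]) := by
      intro acc i
      rw [PySem.List.foldl_append_singleton_eq_map]
      congr 1
      have : (List.range' (i + 1) (subdivision.length - (i + 1))).map
          (fun k => [-(3 * gridWidth * (1 + (subdivision.getD i (0, 0)).2) + 1
              + 3 * (subdivision.getD i (0, 0)).1 + mode),
            -(3 * gridWidth * (1 + (subdivision.getD k (0, 0)).2) + 1
              + 3 * (subdivision.getD k (0, 0)).1 + mode)])
          = (List.range' (i + 1) (L.length - (i + 1))).map
            (fun k => [-(L.getD i (lit (0, 0))), -(L.getD k (lit (0, 0)))]) := by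
        rw [hlen]
        exact List.map_congr_left (fun k _ => by rw [hgd i, hgd k])
      rw [this]
      rw [← pv_map_getD_range' L (lit (0, 0)) (i + 1), List.map_map]
      simp [Function.comp]
    calc (List.range (subdivision.length - 1)).foldl (fun acc i =>
            (List.range' (i + 1) (subdivision.length - (i + 1))).foldl (fun acc2 k =>
              acc2 ++ [[-(3 * gridWidth * (1 + (subdivision.getD i (0, 0)).2) + 1
                  + 3 * (subdivision.getD i (0, 0)).1 + mode),
                -(3 * gridWidth * (1 + (subdivision.getD k (0, 0)).2) + 1
                  + 3 * (subdivision.getD k (0, 0)).1 + mode)]]) acc) []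
        = (List.range (subdivision.length - 1)).foldl (fun acc i =>
            acc ++ (L.drop (i + 1)).map (fun b => [-(L.getD i (lit (0, 0))), -b])) [] := by
          apply PySem.List.foldl_congr_mem
          intro acc i _
          exact hinner acc i
      _ = (List.range (subdivision.length - 1)).flatMap
            (fun i => (L.drop (i + 1)).map (fun b => [-(L.getD i (lit (0, 0))), -b])) := by
          rw [PySem.List.foldl_append_eq_flatMap, List.nil_append]
      _ = (List.range L.length).flatMap
            (fun i => (L.drop (i + 1)).map (fun b => [-(L.getD i (lit (0, 0))), -b])) := by
          rcases Nat.eq_zero_or_pos subdivision.length with h0 | hpos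
          · rw [hlen, h0]
          · rw [hlen, show subdivision.length = (subdivision.length - 1) + 1 from (Nat.succ_pred_eq_of_pos hpos).symm,
              List.range_succ, List.flatMap_append]
            simp
            omega
      _ = pvPairsB L := pv_pairs_eq L _

-- ===== VERDICT (by name: the statement is the Claim_ definition above) =====
theorem clauseSubdivision_spec : Claim_equal_clauseSubdivision := by
  intro subdivision gridWidth mode _
  exact clauseSubdivision_eq subdivision gridWidth mode
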